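-- pv_equiv track=rewrite | github.com/Freasylol/ISP-2022-053505 | task_1/logicUnit.py | calcWords
-- ===== SOURCE A (Python) =====
-- def calcWords(text):
--     wordArr = []
--     counter = 1
--     for el in text:
--         if (el == ' '):
--             counter += 1
--         elif (el == '.'):
--             wordArr.append(counter)
--             counter = 1
--     return wordArr
-- ===== SOURCE B (Python) =====
-- def calcWords(text):
--     return [seg.count(' ') + 1 for seg in text.split('.')[:-1]]
-- ===== Notes on version B (the rewrite author's own statement) =====
-- stated objective: simpler
-- what changed: Replaced the incremental character-by-character state machine with a two-stage decomposition: split the text on the period character, drop the trailing segment, and count spaces in each remaining segment; the bulk work moves into C-level str methods.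
import Mathlib
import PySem

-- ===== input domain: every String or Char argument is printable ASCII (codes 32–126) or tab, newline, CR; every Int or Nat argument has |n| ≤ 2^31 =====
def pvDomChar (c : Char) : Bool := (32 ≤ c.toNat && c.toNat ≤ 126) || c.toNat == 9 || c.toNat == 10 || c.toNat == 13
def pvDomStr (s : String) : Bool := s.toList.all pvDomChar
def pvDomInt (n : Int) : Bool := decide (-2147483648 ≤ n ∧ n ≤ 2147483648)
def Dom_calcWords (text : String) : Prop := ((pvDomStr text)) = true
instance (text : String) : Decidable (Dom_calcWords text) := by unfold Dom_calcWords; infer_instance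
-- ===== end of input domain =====

-- B replaces A's incremental per-character state machine by split('.') then counting spaces per segment (simpler decomposition).


-- ===== PORT A =====
-- for el in text: if el==' ': counter += 1 elif el=='.': wordArr.append(counter); counter = 1
def calcWords (text : String) : List Int :=
  (text.toList.foldl
    (fun (s : List Int × Int) el =>
      if el = ' ' then (s.1, s.2 + 1)
      else if el = '.' then (s.1 ++ [s.2], 1)
      else s)
    ([], 1)).1

-- ===== PORT B =====
-- [seg.count(' ') + 1 for seg in text.split('.')[:-1]]
def calcWords_alt (text : String) : List Int :=
  (PySem.Chars.splitOn text.toList ".".toList).dropLast.map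
    (fun seg => (PySem.Chars.count seg " ".toList : Int) + 1)

-- ===== PRECONDITION & SPEC =====
def Spec_calcWords (text : String) (out : List Int) : Prop := out = calcWords_alt text
instance (text : String) (out : List Int) : Decidable (Spec_calcWords text out) := by unfold Spec_calcWords; infer_instance

-- ===== CLAIM (what is proved, stated in full; the proofs are below) =====
def Claim_equal_calcWords : Prop := ∀ (text : String), Dom_calcWords text → Spec_calcWords text (calcWords text)

-- ===== LEMMAS AND PROOFS =====

/-- A's emitted counts, as a direct recursion on the character list. -/
def pvRec : List Char → Int → List Int
  | [], _ => []
  | e :: t, c => if e = ' ' then pvRec t (c + 1) else if e = '.' then c :: pvRec t 1 else pvRec t c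

/-- Reference split on '.' carrying the reversed current segment. -/
def pvSplit : List Char → List Char → List (List Char)
  | [], cur => [cur.reverse]
  | c :: t, cur => if c = '.' then cur.reverse :: pvSplit t [] else pvSplit t (c :: cur)

theorem pvSplit_ne_nil (l cur : List Char) : pvSplit l cur ≠ [] := by
  induction l generalizing cur with
  | nil => simp [pvSplit]
  | cons c t ih => simp only [pvSplit]; split_ifs <;> simp [ih]

theorem foldA_eq (l : List Char) (arr : List Int) (c : Int) :
    (l.foldl
      (fun (s : List Int × Int) el =>
        if el = ' ' then (s.1, s.2 + 1)
        else if el = '.' then (s.1 ++ [s.2], 1)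
        else s)
      (arr, c)).1 = arr ++ pvRec l c := by
  induction l generalizing arr c with
  | nil => simp [pvRec]
  | cons e t ih =>
    simp only [List.foldl_cons, pvRec]
    split_ifs <;> simp [ih]

theorem splitOn_go_eq (l : List Char) (fuel : Nat) (cur : List Char) (acc : List (List Char))
    (h : l.length ≤ fuel) :
    PySem.Chars.splitOn.go ['.'] fuel l cur acc = acc.reverse ++ pvSplit l cur := by
  induction l generalizing fuel cur acc with
  | nil => cases fuel <;> simp [PySem.Chars.splitOn.go, pvSplit]
  | cons c t ih =>
    cases fuel with
    | zero => simp at h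
    | succ fuel =>
      simp only [PySem.Chars.splitOn.go, pvSplit]
      by_cases hc : c = '.'
      · have : List.isPrefixOf ['.'] (c :: t) = true := by simp [List.isPrefixOf, hc]
        rw [this]
        simp only [if_pos hc, List.length_cons, if_true, List.length_nil, List.drop_succ_cons,
          List.drop_zero] at h ⊢
        rw [ih fuel [] (cur.reverse :: acc) (by omega)]
        simp
      · have : List.isPrefixOf ['.'] (c :: t) = false := by
          simp [List.isPrefixOf]; exact fun h => absurd h.symm hc
        rw [this]
        simp only [if_neg hc, List.length_cons, if_false, Bool.false_eq_true] at h ⊢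
        exact ih fuel (c :: cur) acc (by omega)

theorem splitOn_dot (l : List Char) : PySem.Chars.splitOn l ['.'] = pvSplit l [] := by
  unfold PySem.Chars.splitOn
  rw [splitOn_go_eq l (l.length + 1) [] [] (by omega)]
  simp

theorem count_go_eq (l : List Char) (fuel : Nat) (acc : Nat) (h : l.length ≤ fuel) :
    PySem.Chars.count.go [' '] fuel l acc = acc + l.count ' ' := by
  induction l generalizing fuel acc with
  | nil => cases fuel <;> simp [PySem.Chars.count.go]
  | cons c t ih =>
    cases fuel with
    | zero => simp at h
    | succ fuel =>
      simp only [PySem.Chars.count.go]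
      by_cases hc : c = ' '
      · have : List.isPrefixOf [' '] (c :: t) = true := by simp [List.isPrefixOf, hc]
        rw [this]
        simp only [List.length_cons, if_true, List.drop_succ_cons,
          List.drop_zero, List.length_nil] at h ⊢
        rw [ih fuel (acc + 1) (by omega)]
        simp [hc]
        omega
      · have : List.isPrefixOf [' '] (c :: t) = false := by
          simp [List.isPrefixOf]; exact fun h => absurd h.symm hc
        rw [this]
        simp only [List.length_cons, if_false, Bool.false_eq_true] at h ⊢
        rw [ih fuel acc (by omega)]
        simp [hc]

theorem count_space (l : List Char) : PySem.Chars.count l [' '] = l.count ' ' := by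
  unfold PySem.Chars.count
  simp only [List.isEmpty_cons, if_false, Bool.false_eq_true]
  rw [count_go_eq l l.length 0 (le_refl _)]; omega

theorem rec_eq_split (l cur : List Char) :
    pvRec l (1 + (cur.count ' ' : Int)) =
      (pvSplit l cur).dropLast.map (fun seg => (seg.count ' ' : Int) + 1) := by
  induction l generalizing cur with
  | nil => simp [pvRec, pvSplit]
  | cons c t ih =>
    simp only [pvRec, pvSplit]
    by_cases hsp : c = ' '
    · have hdot : ¬ c = '.' := by simp [hsp]
      simp only [if_pos hsp, if_neg hdot]
      have : (1 : Int) + (cur.count ' ' : Int) + 1 = 1 + ((' ' :: cur).count ' ' : Int) := by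
        simp; ring
      rw [this, ih (' ' :: cur)]
      simp [hsp]
    · by_cases hdot : c = '.'
      · subst hdot
        rw [if_neg hsp, if_pos rfl, if_pos rfl]
        obtain ⟨s0, rest, hs⟩ : ∃ s0 rest, pvSplit t [] = s0 :: rest := by
          cases h : pvSplit t [] with
          | nil => exact absurd h (pvSplit_ne_nil t [])
          | cons s0 rest => exact ⟨s0, rest, rfl⟩
        have h1 := ih ([] : List Char)
        simp only [List.count_nil, Nat.cast_zero, add_zero] at h1
        rw [hs] at h1 ⊢
        rw [List.dropLast_cons_of_ne_nil (by simp)]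
        simp only [List.map_cons]
        rw [h1, List.count_reverse]
        congr 1
        ring
      · simp only [if_neg hsp, if_neg hdot]
        have : (1 : Int) + (cur.count ' ' : Int) = 1 + ((c :: cur).count ' ' : Int) := by
          simp [hsp]
        rw [this, ih (c :: cur)]

-- ===== VERDICT (by name: the statement is the Claim_ definition above) =====
theorem calcWords_spec : Claim_equal_calcWords := by
  intro text _
  show calcWords text = calcWords_alt text
  unfold calcWords calcWords_alt
  rw [foldA_eq, List.nil_append, show ".".toList = ['.'] from rfl, splitOn_dot]
  have := rec_eq_split text.toList []
  simp only [List.count_nil, Nat.cast_zero, add_zero] at this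
  rw [this]
  apply List.map_congr_left
  intro seg _
  rw [show " ".toList = [' '] from rfl, count_space]
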